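-- pv_equiv track=rewrite | github.com/nacho-pancho/luisa-apps | scores/code/scores.py | group_by_length
-- ===== SOURCE A (Python) =====
-- def group_by_length(listado, minlen, maxlen):
--     '''
--     Agrupa las palabras en 'listado' según su largo.
--     Se descartan todas las que tengan largo menor a minlen
--     Todas las que tienen largo mayor o igual a 'maxlen'
--     van al mismo grupo.
--     '''
--     vec = list()
--     i = 0
--     l = minlen
--     while l < maxlen:
--         aux = [pal for pal in listado if len(pal) == l]
--         vec.append(aux)
--         i += 1
--         l += 1
--     aux = [pal for pal in listado if len(pal) >= l]
--     vec.append(aux)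
--     return vec
-- ===== SOURCE B (Python) =====
-- def group_by_length(listado, minlen, maxlen):
--     nb = max(maxlen - minlen, 0) + 1
--     vec = [[] for _ in range(nb)]
--     for pal in listado:
--         if len(pal) >= minlen:
--             vec[min(len(pal) - minlen, nb - 1)].append(pal)
--     return vec
-- ===== Notes on version B (the rewrite author's own statement) =====
-- stated objective: faster
-- what changed: Replaces A's per-length rescans of the whole list (one filter pass for every length in [minlen, maxlen]) by a single pass that routes each word directly into its bucket min(len-minlen, last).
import Mathlib
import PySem

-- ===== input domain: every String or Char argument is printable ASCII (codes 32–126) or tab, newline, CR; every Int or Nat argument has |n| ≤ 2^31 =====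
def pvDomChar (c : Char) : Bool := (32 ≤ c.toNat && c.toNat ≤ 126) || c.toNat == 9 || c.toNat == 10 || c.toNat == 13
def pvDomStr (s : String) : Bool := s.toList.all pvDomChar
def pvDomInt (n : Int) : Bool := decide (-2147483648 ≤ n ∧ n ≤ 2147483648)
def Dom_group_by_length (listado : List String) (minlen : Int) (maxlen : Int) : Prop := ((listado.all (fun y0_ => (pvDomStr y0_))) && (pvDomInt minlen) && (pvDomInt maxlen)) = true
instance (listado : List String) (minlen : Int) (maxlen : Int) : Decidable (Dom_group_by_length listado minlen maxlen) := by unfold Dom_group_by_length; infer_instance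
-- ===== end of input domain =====

-- B replaces A's per-length rescans of the list by a single pass that drops each word
-- into its bucket (objective: faster, O((maxlen-minlen)·n) → O(n + (maxlen-minlen))).

-- ===== PORT A =====
-- the while loop of A: state (i, l, vec); recursion on the remaining count (maxlen - l)
def pvA_loop (listado : List String) (i l maxlen : Int) (vec : List (List String)) : List (List String) :=
  if l < maxlen then
    pvA_loop listado (i + 1) (l + 1) maxlen
      (vec ++ [listado.filter (fun pal => PySem.Str.len pal == l)])
  else
    vec ++ [listado.filter (fun pal => decide (PySem.Str.len pal ≥ l))]
  termination_by (maxlen - l).toNat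
  decreasing_by omega

def group_by_length (listado : List String) (minlen : Int) (maxlen : Int) : List (List String) :=
  pvA_loop listado 0 minlen maxlen []

-- ===== PORT B =====
def group_by_length_alt (listado : List String) (minlen : Int) (maxlen : Int) : List (List String) :=
  let nb : Nat := (max (maxlen - minlen) 0).toNat + 1
  listado.foldl
    (fun vec pal =>
      if PySem.Str.len pal ≥ minlen then
        vec.modify (min (PySem.Str.len pal - minlen).toNat (nb - 1)) (· ++ [pal])
      else vec)
    (List.replicate nb [])

-- ===== PRECONDITION & SPEC =====
def Spec_group_by_length (listado : List String) (minlen : Int) (maxlen : Int) (out : List (List String)) : Prop := out = group_by_length_alt listado minlen maxlen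
instance (listado : List String) (minlen : Int) (maxlen : Int) (out : List (List String)) : Decidable (Spec_group_by_length listado minlen maxlen out) := by unfold Spec_group_by_length; infer_instance

-- ===== CLAIM (what is proved, stated in full; the proofs are below) =====
def Claim_equal_group_by_length : Prop := ∀ (listado : List String) (minlen : Int) (maxlen : Int), Dom_group_by_length listado minlen maxlen → Spec_group_by_length listado minlen maxlen (group_by_length listado minlen maxlen)

-- ===== LEMMAS AND PROOFS =====

-- A's loop appends, for each l, l+1, …, maxlen-1, the filter on that exact length,
-- then the final "≥ final l" filter.
theorem pvA_loop_spec (listado : List String) :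
    ∀ (n : Nat) (i l maxlen : Int) (vec : List (List String)), (maxlen - l).toNat = n →
    pvA_loop listado i l maxlen vec =
      vec ++ (List.range n).map (fun j : Nat => listado.filter (fun pal => PySem.Str.len pal == l + (j : Int)))
          ++ [listado.filter (fun pal => decide (PySem.Str.len pal ≥ l + (n : Int)))] := by
  intro n
  induction n with
  | zero =>
    intro i l maxlen vec h
    rw [pvA_loop]
    have : ¬ l < maxlen := by omega
    simp [this]
  | succ n ih =>
    intro i l maxlen vec h
    rw [pvA_loop]
    have hl : l < maxlen := by omega
    simp only [if_pos hl]
    rw [ih (i + 1) (l + 1) maxlen _ (by omega)]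
    rw [List.range_succ_eq_map]
    simp only [List.map_cons, List.map_map, Function.comp_def, List.append_assoc,
      List.cons_append, List.nil_append]
    have e0 : l + ((0 : Nat) : Int) = l := by omega
    have e1 : ∀ j : Nat, l + ((j.succ : Nat) : Int) = l + 1 + (j : Int) := by intro j; omega
    have e2 : l + (((n + 1 : Nat)) : Int) = l + 1 + (n : Int) := by omega
    simp only [e0, e1]

-- getD form of List.getElem?_modify
theorem getD_modify {α : Type} (l : List α) (i j : Nat) (f : α → α) (d : α) (hj : j < l.length) :
    (l.modify i f).getD j d = if i = j then f (l.getD j d) else l.getD j d := by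
  rw [List.getD_eq_getElem?_getD, List.getD_eq_getElem?_getD, List.getElem?_modify]
  rw [List.getElem?_eq_getElem hj]
  by_cases h : i = j <;> simp [h]

theorem map_range_getD {α : Type} (l : List α) (d : α) :
    (List.range l.length).map (fun j => l.getD j d) = l := by
  induction l with
  | nil => simp
  | cons x xs ih =>
    have h2 : (List.range xs.length).map ((fun j => (x :: xs).getD j d) ∘ Nat.succ) = xs := by
      rw [show ((fun j => (x :: xs).getD j d) ∘ Nat.succ) = (fun j => xs.getD j d) from
        funext (fun j => by simp), ih]
    simp only [List.length_cons, List.range_succ_eq_map, List.map_cons, List.map_map,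
      List.getD_cons_zero, h2]

-- the single-pass fold: every bucket j ends up as (its start) ++ the filter of the words routed to j
theorem foldB_spec (minlen : Int) (nb : Nat) :
    ∀ (xs : List String) (acc : List (List String)), acc.length = nb →
    xs.foldl
      (fun vec pal =>
        if PySem.Str.len pal ≥ minlen then
          vec.modify (min (PySem.Str.len pal - minlen).toNat (nb - 1)) (· ++ [pal])
        else vec) acc =
    (List.range nb).map (fun j => acc.getD j [] ++
      xs.filter (fun pal => decide (PySem.Str.len pal ≥ minlen ∧
        min (PySem.Str.len pal - minlen).toNat (nb - 1) = j))) := by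
  intro xs
  induction xs with
  | nil =>
    intro acc hacc
    simp only [List.foldl_nil, List.filter_nil, List.append_nil]
    rw [← hacc, map_range_getD]
  | cons pal xs ih =>
    intro acc hacc
    simp only [List.foldl_cons]
    by_cases hp : PySem.Str.len pal ≥ minlen
    · rw [if_pos hp]
      rw [ih _ (by rw [List.length_modify]; exact hacc)]
      apply List.map_congr_left
      intro j hj
      rw [List.mem_range] at hj
      rw [getD_modify _ _ _ _ _ (by omega)]
      by_cases hidx : min (PySem.Str.len pal - minlen).toNat (nb - 1) = j
      · rw [if_pos hidx, List.filter_cons, if_pos (by simp only [decide_eq_true_eq]; exact ⟨hp, hidx⟩), List.append_assoc]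
        simp
      · rw [if_neg hidx, List.filter_cons,
          if_neg (by simp only [decide_eq_true_eq]; exact fun h => hidx h.2)]
    · rw [if_neg hp]
      rw [ih _ hacc]
      apply List.map_congr_left
      intro j _
      rw [List.filter_cons, if_neg (by simp only [decide_eq_true_eq]; exact fun h => hp h.1)]

theorem len_nonneg (s : String) : 0 ≤ PySem.Str.len s := by
  simp [PySem.Str.len_eq]

-- ===== VERDICT (by name: the statement is the Claim_ definition above) =====
theorem group_by_length_spec : Claim_equal_group_by_length := by
  intro listado minlen maxlen _
  unfold Spec_group_by_length group_by_length group_by_length_alt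
  set n : Nat := (maxlen - minlen).toNat with hn
  have hnb : (max (maxlen - minlen) 0).toNat + 1 = n + 1 := by omega
  rw [hnb]
  rw [pvA_loop_spec listado n 0 minlen maxlen [] rfl]
  rw [foldB_spec minlen (n + 1) listado (List.replicate (n + 1) []) (by simp)]
  simp only [List.nil_append]
  rw [List.range_succ, List.map_append, List.map_singleton]
  congr 1
  · apply List.map_congr_left
    intro j hj
    rw [List.mem_range] at hj
    rw [List.getD_replicate _ (by omega), List.nil_append]
    apply List.filter_congr
    intro pal _
    have h0 := len_nonneg pal
    rw [Bool.eq_iff_iff]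
    simp only [beq_iff_eq, decide_eq_true_eq]
    omega
  · rw [List.getD_replicate _ (by omega), List.nil_append]
    congr 1
    apply List.filter_congr
    intro pal _
    have h0 := len_nonneg pal
    rw [Bool.eq_iff_iff]
    simp only [decide_eq_true_eq, ge_iff_le]
    omega
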